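-- pv_equiv track=rewrite | github.com/websitefingerprinting/WebsiteFingerprinting | attacks/df/dfpytorch.py | score_func
-- ===== SOURCE A (Python) =====
-- def score_func(predictions, ground_truths, mon_site_num):
--     tp, wp, fp, p, n = 0, 0, 0, 0 ,0
--     for truth,prediction in zip(ground_truths, predictions):
--         if truth != mon_site_num:
--             p += 1
--         else:
--             n += 1
--         if prediction != mon_site_num:
--             if truth == prediction:
--                 tp += 1
--             else:
--                 if truth != mon_site_num:
--                     wp += 1
--                 else:
--                     fp += 1
--     return tp, wp, fp, p, n
-- ===== SOURCE B (Python) =====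
-- def score_func(predictions, ground_truths, mon_site_num):
--     m = mon_site_num
--     pairs = list(zip(ground_truths, predictions))
--     p = sum(1 for t, _ in pairs if t != m)
--     n = len(pairs) - p
--     tp = sum(1 for t, pr in pairs if pr != m and t == pr)
--     wp = sum(1 for t, pr in pairs if pr != m and t != pr and t != m)
--     fp = sum(1 for t, pr in pairs if t == m and pr != m)
--     return tp, wp, fp, p, n
-- ===== Notes on version B (the rewrite author's own statement) =====
-- stated objective: alternative
-- what changed: Replaces the single accumulator loop with nested branches by five independent predicate-counting passes over the zipped pairs (each tally is a count of one flattened boolean condition; n is derived as length minus p).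
import Mathlib
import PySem

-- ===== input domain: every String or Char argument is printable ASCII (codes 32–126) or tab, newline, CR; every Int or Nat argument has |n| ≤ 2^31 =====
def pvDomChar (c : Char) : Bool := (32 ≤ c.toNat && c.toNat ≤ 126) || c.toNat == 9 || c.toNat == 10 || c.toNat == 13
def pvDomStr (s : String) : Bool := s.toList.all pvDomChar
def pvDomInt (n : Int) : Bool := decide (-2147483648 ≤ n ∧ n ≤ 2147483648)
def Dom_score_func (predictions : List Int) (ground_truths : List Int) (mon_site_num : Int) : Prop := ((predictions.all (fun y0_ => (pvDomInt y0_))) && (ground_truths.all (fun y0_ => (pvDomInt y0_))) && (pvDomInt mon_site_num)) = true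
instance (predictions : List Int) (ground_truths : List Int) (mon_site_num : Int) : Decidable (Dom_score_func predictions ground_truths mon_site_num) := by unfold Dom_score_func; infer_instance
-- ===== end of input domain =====

-- B replaces A's single accumulator loop by five independent predicate counts over the zipped pairs (alternative decomposition, same cost).
-- ===== PORT A =====
def scoreStep (mon_site_num : Int) (s : Int × Int × Int × Int × Int) (e : Int × Int) : Int × Int × Int × Int × Int :=
  let (tp, wp, fp, p, n) := s
  let (truth, prediction) := e
  let (p, n) := if truth ≠ mon_site_num then (p + 1, n) else (p, n + 1)
  if prediction ≠ mon_site_num then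
    if truth = prediction then (tp + 1, wp, fp, p, n)
    else if truth ≠ mon_site_num then (tp, wp + 1, fp, p, n)
    else (tp, wp, fp + 1, p, n)
  else (tp, wp, fp, p, n)

def score_func (predictions : List Int) (ground_truths : List Int) (mon_site_num : Int) : Int × Int × Int × Int × Int :=
  (List.zip ground_truths predictions).foldl (scoreStep mon_site_num) (0, 0, 0, 0, 0)

-- ===== PORT B =====
def score_func_alt (predictions : List Int) (ground_truths : List Int) (mon_site_num : Int) : Int × Int × Int × Int × Int :=
  let m := mon_site_num
  let pairs := List.zip ground_truths predictions
  let p : Int := pairs.countP (fun e => e.1 != m)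
  let n : Int := (pairs.length : Int) - p
  let tp : Int := pairs.countP (fun e => e.2 != m && e.1 == e.2)
  let wp : Int := pairs.countP (fun e => e.2 != m && e.1 != e.2 && e.1 != m)
  let fp : Int := pairs.countP (fun e => e.1 == m && e.2 != m)
  (tp, wp, fp, p, n)

-- ===== PRECONDITION & SPEC =====
def Spec_score_func (predictions : List Int) (ground_truths : List Int) (mon_site_num : Int) (out : Int × Int × Int × Int × Int) : Prop := out = score_func_alt predictions ground_truths mon_site_num
instance (predictions : List Int) (ground_truths : List Int) (mon_site_num : Int) (out : Int × Int × Int × Int × Int) : Decidable (Spec_score_func predictions ground_truths mon_site_num out) := by unfold Spec_score_func; infer_instance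

-- ===== CLAIM (what is proved, stated in full; the proofs are below) =====
def Claim_equal_score_func : Prop := ∀ (predictions : List Int) (ground_truths : List Int) (mon_site_num : Int), Dom_score_func predictions ground_truths mon_site_num → Spec_score_func predictions ground_truths mon_site_num (score_func predictions ground_truths mon_site_num)

-- ===== LEMMAS AND PROOFS =====
theorem scoreLoop_eq (m : Int) (pairs : List (Int × Int)) (s : Int × Int × Int × Int × Int) :
    pairs.foldl (scoreStep m) s =
      (s.1 + (pairs.countP (fun e => e.2 != m && e.1 == e.2) : Int),
       s.2.1 + (pairs.countP (fun e => e.2 != m && e.1 != e.2 && e.1 != m) : Int),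
       s.2.2.1 + (pairs.countP (fun e => e.1 == m && e.2 != m) : Int),
       s.2.2.2.1 + (pairs.countP (fun e => e.1 != m) : Int),
       s.2.2.2.2 + ((pairs.length : Int) - (pairs.countP (fun e => e.1 != m) : Int))) := by
  induction pairs generalizing s with
  | nil => simp
  | cons e rest ih =>
    obtain ⟨t, pr⟩ := e
    obtain ⟨tp, wp, fp, p, n⟩ := s
    simp only [List.foldl_cons, ih, scoreStep, List.countP_cons, List.length_cons]
    by_cases h1 : t = m <;> by_cases h2 : pr = m <;> by_cases h3 : t = pr <;>
      simp_all [bne, beq_iff_eq] <;> omega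

-- ===== VERDICT (by name: the statement is the Claim_ definition above) =====
theorem score_func_spec : Claim_equal_score_func := by
  intro predictions ground_truths m _
  unfold Spec_score_func score_func score_func_alt
  rw [scoreLoop_eq]
  simp
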